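-- pv_equiv track=rewrite | github.com/japcio/python | kropek v3.py | declare_empty_table
-- ===== SOURCE A (Python) =====
-- def declare_empty_table(board_size):
--     snake_board=[]
--     for i in range (0,board_size):
--        snake_board.append([])
--        for j in range(0, board_size):
--            snake_board[i].append(" ")
--
--     #write border in table
--     for i in range(0,board_size):
--         snake_board[0][i]="_"
--         snake_board[board_size-1][i]="-"
--     for i in range (1,board_size-1):
--         snake_board[i][0]="|"
--         snake_board[i][board_size-1]="|"
--     return snake_board
-- ===== SOURCE B (Python) =====
-- def declare_empty_table(board_size):
--     last = board_size - 1
--     return [["-" if i == last else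
--              "_" if i == 0 else
--              "|" if j == 0 or j == last else
--              " " for j in range(board_size)] for i in range(board_size)]
-- ===== Notes on version B (the rewrite author's own statement) =====
-- stated objective: simpler
-- what changed: Each cell's final character is computed directly from its coordinates in one nested comprehension, replacing the fill-with-spaces pass plus three border-overwrite passes.
import Mathlib
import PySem

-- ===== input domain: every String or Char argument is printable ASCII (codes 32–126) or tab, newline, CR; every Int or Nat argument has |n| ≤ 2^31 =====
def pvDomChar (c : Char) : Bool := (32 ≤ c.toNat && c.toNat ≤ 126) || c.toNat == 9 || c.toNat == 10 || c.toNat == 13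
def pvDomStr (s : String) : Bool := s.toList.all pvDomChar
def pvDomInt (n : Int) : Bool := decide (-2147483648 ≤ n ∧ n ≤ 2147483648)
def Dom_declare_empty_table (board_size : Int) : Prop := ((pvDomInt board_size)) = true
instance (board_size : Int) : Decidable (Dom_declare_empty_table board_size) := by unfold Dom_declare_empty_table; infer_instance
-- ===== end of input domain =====

-- B computes each cell's final character directly from its coordinates in one nested
-- comprehension, replacing A's fill-with-spaces pass plus three border-overwrite passes
-- (objective: simpler; same O(n^2) cost).

-- ===== PORT A =====
-- Python `snake_board[i][j] = v` (indices in range wherever A executes it):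
def pySet2 (b : List (List String)) (i j : Nat) (v : String) : List (List String) :=
  b.set i ((b.getD i []).set j v)

def declare_empty_table (board_size : Int) : List (List String) :=
  -- build n rows, appending " " n times to row i
  let b1 := (PySem.List.pyRange 0 board_size 1).foldl (fun b i =>
      let b' := b ++ [([] : List String)]
      (PySem.List.pyRange 0 board_size 1).foldl
        (fun bb _ => bb.set i.toNat ((bb.getD i.toNat []) ++ [" "])) b') []
  -- top/bottom borders
  let b2 := (PySem.List.pyRange 0 board_size 1).foldl (fun b i =>
      pySet2 (pySet2 b 0 i.toNat "_") (board_size - 1).toNat i.toNat "-") b1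
  -- side borders
  (PySem.List.pyRange 1 (board_size - 1) 1).foldl (fun b i =>
      pySet2 (pySet2 b i.toNat 0 "|") i.toNat (board_size - 1).toNat "|") b2

-- ===== PORT B =====
def declare_empty_table_alt (board_size : Int) : List (List String) :=
  let last := board_size - 1
  (PySem.List.pyRange 0 board_size 1).map (fun i =>
    (PySem.List.pyRange 0 board_size 1).map (fun j =>
      if i = last then "-"
      else if i = 0 then "_"
      else if j = 0 ∨ j = last then "|"
      else " "))

-- ===== PRECONDITION & SPEC =====
def Spec_declare_empty_table (board_size : Int) (out : List (List String)) : Prop := out = declare_empty_table_alt board_size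
instance (board_size : Int) (out : List (List String)) : Decidable (Spec_declare_empty_table board_size out) := by unfold Spec_declare_empty_table; infer_instance

-- ===== CLAIM (what is proved, stated in full; the proofs are below) =====
def Claim_equal_declare_empty_table : Prop := ∀ (board_size : Int), Dom_declare_empty_table board_size → Spec_declare_empty_table board_size (declare_empty_table board_size)

-- ===== LEMMAS AND PROOFS =====

-- row after m top/bottom writes
def rowA (N m : Nat) (c : String) : List String := List.replicate m c ++ List.replicate (N - m) " "

def stage1 (N m : Nat) : List (List String) :=
  (List.range N).map (fun r =>
    if r = N - 1 then rowA N m "-" else if r = 0 then rowA N m "_" else List.replicate N " ")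

def sideRow (N : Nat) : List String := ((List.replicate N " ").set 0 "|").set (N - 1) "|"

def stage2 (N m : Nat) : List (List String) :=
  (List.range N).map (fun r =>
    if r = N - 1 then List.replicate N "-"
    else if r = 0 then List.replicate N "_"
    else if 1 ≤ r ∧ r ≤ m then sideRow N
    else List.replicate N " ")

-- inner fill loop
theorem fill_loop {α : Type} (l : List α) : ∀ (b : List (List String)) (i : Nat), i < b.length →
    l.foldl (fun bb _ => bb.set i ((bb.getD i []) ++ [" "])) b
      = b.set i ((b.getD i []) ++ List.replicate l.length " ") := by
  induction l with
  | nil =>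
    intro b i h
    simp [List.getD, List.getElem?_eq_getElem h, List.set_getElem_self]
  | cons x l ih =>
    intro b i h
    simp only [List.foldl_cons]
    rw [ih (b.set i ((b.getD i []) ++ [" "])) i (by simpa using h)]
    simp [List.getD, List.getElem?_set_self h, List.set_set, List.replicate_succ,
      List.append_assoc]

-- build phase
theorem build_phase (N : Nat) : ∀ m : Nat,
    (List.range m).foldl (fun b (k : Nat) =>
        let b' := b ++ [([] : List String)]
        (List.range N).foldl (fun bb _ => bb.set k ((bb.getD k []) ++ [" "])) b') []
      = List.replicate m (List.replicate N " ") := by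
  intro m
  induction m with
  | zero => simp
  | succ m ih =>
    rw [List.range_succ, List.foldl_append, ih]
    simp only [List.foldl_cons, List.foldl_nil]
    rw [fill_loop (List.range N) (List.replicate m (List.replicate N " ") ++ [([] : List String)]) m (by simp)]
    have hget : (List.replicate m (List.replicate N " ") ++ [([] : List String)]).getD m [] = [] := by
      simp [List.getD, List.length_replicate]
    rw [hget, List.set_append_right m _ (by simp)]
    simp [List.replicate_succ']

theorem rowA_zero (N : Nat) (c : String) : rowA N 0 c = List.replicate N " " := by
  simp [rowA]

theorem rowA_set (N m : Nat) (c : String) (h : m < N) :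
    (rowA N m c).set m c = rowA N (m + 1) c := by
  rw [rowA, List.set_append_right m _ (by simp)]
  simp only [List.length_replicate, Nat.sub_self]
  have : N - m = (N - (m + 1)) + 1 := by omega
  rw [this, List.replicate_succ, List.set_cons_zero, rowA, List.replicate_succ']
  simp [List.append_assoc]

theorem stage1_zero (N : Nat) : stage1 N 0 = List.replicate N (List.replicate N " ") := by
  apply List.ext_getElem <;> simp [stage1, rowA_zero]

theorem getD_map_range {α : Type} [Inhabited α] (N r : Nat) (f : Nat → α) (d : α) (h : r < N) :
    ((List.range N).map f).getD r d = f r := by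
  simp [List.getD, h]

theorem stage1_length (N m : Nat) : (stage1 N m).length = N := by simp [stage1]

theorem stage2_length (N m : Nat) : (stage2 N m).length = N := by simp [stage2]

theorem stage1_step (N m : Nat) (hN : 0 < N) (hm : m < N) :
    pySet2 (pySet2 (stage1 N m) 0 m "_") (N - 1) m "-" = stage1 N (m + 1) := by
  by_cases hN1 : N = 1
  · subst hN1
    interval_cases m
    simp [pySet2, stage1, rowA, List.getD]
  · have h2 : 2 ≤ N := by omega
    have hNe : (0 : Nat) ≠ N - 1 := by omega
    have hget0 : (stage1 N m).getD 0 [] = rowA N m "_" := by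
      rw [stage1, getD_map_range _ _ _ _ hN]
      simp [hNe]
    have e1 : pySet2 (stage1 N m) 0 m "_" = (stage1 N m).set 0 (rowA N (m + 1) "_") := by
      rw [pySet2, hget0, rowA_set _ _ _ hm]
    have hgetN : ((stage1 N m).set 0 (rowA N (m + 1) "_")).getD (N - 1) [] = rowA N m "-" := by
      rw [List.getD, List.getElem?_set_ne (show (0 : Nat) ≠ N - 1 by omega)]
      rw [stage1, List.getElem?_map, List.getElem?_range (show N - 1 < N by omega)]
      simp
    have e2 : pySet2 ((stage1 N m).set 0 (rowA N (m + 1) "_")) (N - 1) m "-"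
        = ((stage1 N m).set 0 (rowA N (m + 1) "_")).set (N - 1) (rowA N (m + 1) "-") := by
      rw [pySet2, hgetN, rowA_set _ _ _ hm]
    rw [e1, e2]
    apply List.ext_getElem
    · simp [stage1]
    · intro r h1 hh
      have hr : r < N := by
        rw [List.length_set, List.length_set, stage1_length] at h1; exact h1
      by_cases hr1 : r = N - 1
      · subst hr1
        rw [List.getElem_set_self (by rw [List.length_set, List.length_set, stage1_length]; omega)]
        simp [stage1]
      · rw [List.getElem_set_ne (show N - 1 ≠ r from fun hc => hr1 hc.symm)]
        by_cases hr0 : r = 0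
        · subst hr0
          rw [List.getElem_set_self (by rw [List.length_set, stage1_length]; omega)]
          simp [stage1, hNe]
        · rw [List.getElem_set_ne (show (0 : Nat) ≠ r from fun hc => hr0 hc.symm)]
          simp [stage1, hr1, hr0]

theorem pass1 (N : Nat) (hN : 0 < N) : ∀ m : Nat, m ≤ N →
    (List.range m).foldl (fun b (k : Nat) => pySet2 (pySet2 b 0 k "_") (N - 1) k "-")
        (List.replicate N (List.replicate N " "))
      = stage1 N m := by
  intro m
  induction m with
  | zero => intro _; simp [stage1_zero]
  | succ m ih =>
    intro h
    rw [List.range_succ, List.foldl_append, ih (by omega)]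
    simpa using stage1_step N m hN (by omega)

theorem rowA_full (N : Nat) (c : String) : rowA N N c = List.replicate N c := by
  simp [rowA]

theorem stage2_zero (N : Nat) : stage2 N 0 = stage1 N N := by
  apply List.ext_getElem
  · simp [stage1, stage2]
  · intro r h1 h2
    have hr : r < N := by rw [stage2_length] at h1; exact h1
    simp only [stage2, stage1, List.getElem_map, List.getElem_range, rowA_full]
    have hne : ¬ (1 ≤ r ∧ r ≤ 0) := by omega
    split_ifs <;> rfl

theorem stage2_step (N m : Nat) (h2 : 2 ≤ N) (hm : m + 1 ≤ N - 2) :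
    pySet2 (pySet2 (stage2 N m) (m + 1) 0 "|") (m + 1) (N - 1) "|" = stage2 N (m + 1) := by
  have hlt : m + 1 < N := by omega
  have hget : (stage2 N m).getD (m + 1) [] = List.replicate N " " := by
    rw [stage2, getD_map_range _ _ _ _ hlt]
    have hne1 : ¬ (m + 1 = N - 1) := by omega
    simp [hne1]
  have hget2 : ((stage2 N m).set (m + 1) ((List.replicate N " ").set 0 "|")).getD (m + 1) []
      = (List.replicate N " ").set 0 "|" := by
    rw [List.getD, List.getElem?_set_self (by rw [stage2_length]; omega)]
    rfl
  simp only [pySet2, hget, hget2, List.set_set]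
  apply List.ext_getElem
  · simp [stage2]
  · intro r h1 hh
    have hr : r < N := by rw [List.length_set, stage2_length] at h1; exact h1
    by_cases hrm : r = m + 1
    · subst hrm
      rw [List.getElem_set_self (by rw [List.length_set, stage2_length]; omega)]
      have hne1 : ¬ (m + 1 = N - 1) := by omega
      have hyes : 1 ≤ m + 1 ∧ m + 1 ≤ m + 1 := by omega
      simp [stage2, hne1, hyes, sideRow]
    · rw [List.getElem_set_ne (show m + 1 ≠ r from fun hc => hrm hc.symm)]
      simp only [stage2, List.getElem_map, List.getElem_range]
      by_cases ha : r = N - 1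
      · simp [ha]
      · by_cases hb : r = 0
        · simp [hb]
        · have hiff : (1 ≤ r ∧ r ≤ m + 1) ↔ (1 ≤ r ∧ r ≤ m) := by omega
          simp [ha, hb, hiff]

theorem pass2 (N : Nat) (h2 : 2 ≤ N) : ∀ m : Nat, m ≤ N - 2 →
    (List.range m).foldl (fun b (k : Nat) =>
        pySet2 (pySet2 b (1 + k) 0 "|") (1 + k) (N - 1) "|") (stage1 N N)
      = stage2 N m := by
  intro m
  induction m with
  | zero => intro _; simp [stage2_zero]
  | succ m ih =>
    intro h
    rw [List.range_succ, List.foldl_append, ih (by omega)]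
    have := stage2_step N m h2 h
    simpa [Nat.add_comm 1 m] using this

theorem side_row_eq (N : Nat) (h2 : 2 ≤ N) :
    (List.range N).map (fun (j : Nat) => if (j : Int) = 0 ∨ (j : Int) = (N : Int) - 1 then "|" else " ")
      = sideRow N := by
  apply List.ext_getElem
  · simp [sideRow]
  · intro j h1 hh
    have hj : j < N := by simpa using h1
    simp only [List.getElem_map, List.getElem_range, sideRow]
    by_cases hj1 : j = N - 1
    · subst hj1
      rw [List.getElem_set_self (by simp; omega)]
      have hcond : ((N - 1 : Nat) : Int) = (N : Int) - 1 := by omega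
      simp [hcond]
    · rw [List.getElem_set_ne (show N - 1 ≠ j from fun hc => hj1 hc.symm)]
      by_cases hj0 : j = 0
      · subst hj0
        rw [List.getElem_set_self (by simpa using hj)]
        simp
      · rw [List.getElem_set_ne (show (0 : Nat) ≠ j from fun hc => hj0 hc.symm), List.getElem_replicate]
        have hcond : ¬ ((j : Int) = 0 ∨ (j : Int) = (N : Int) - 1) := by omega
        rw [if_neg hcond]

theorem alt_eq_stage2 (N : Nat) (hN : 0 < N) :
    declare_empty_table_alt (N : Int) = stage2 N (N - 2) := by
  rw [declare_empty_table_alt, PySem.List.pyRange_one]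
  simp only [Int.sub_zero, Int.toNat_natCast, List.map_map]
  apply List.ext_getElem
  · simp [stage2]
  · intro r h1 hh
    have hr : r < N := by simpa using h1
    simp only [List.getElem_map, List.getElem_range, Function.comp_apply, stage2]
    by_cases ha : r = N - 1
    · rw [if_pos ha]
      have hA : ((0 : Int) + (r : Int)) = (N : Int) - 1 := by omega
      apply List.ext_getElem
      · simp
      · intro j hj1 hj2
        simp only [List.getElem_map, List.getElem_range, Function.comp_apply,
          List.getElem_replicate]
        rw [if_pos hA]
    · rw [if_neg ha]
      have hA : ¬ ((0 : Int) + (r : Int) = (N : Int) - 1) := by omega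
      by_cases hb : r = 0
      · rw [if_pos hb]
        have hB : ((0 : Int) + (r : Int)) = 0 := by omega
        apply List.ext_getElem
        · simp
        · intro j hj1 hj2
          simp only [List.getElem_map, List.getElem_range, Function.comp_apply,
            List.getElem_replicate]
          rw [if_neg hA, if_pos hB]
      · have hmid : 1 ≤ r ∧ r ≤ N - 2 := by omega
        rw [if_neg hb, if_pos hmid]
        have h2N : 2 ≤ N := by omega
        have hB : ¬ ((0 : Int) + (r : Int) = 0) := by omega
        rw [← side_row_eq N h2N]
        apply List.ext_getElem
        · simp
        · intro j hj1 hj2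
          simp only [List.getElem_map, List.getElem_range, Function.comp_apply]
          rw [if_neg hA, if_neg hB]
          norm_num

theorem main_eq (board_size : Int) :
    declare_empty_table board_size = declare_empty_table_alt board_size := by
  by_cases hpos : 0 < board_size
  · obtain ⟨N, rfl⟩ : ∃ N : Nat, board_size = (N : Int) :=
      ⟨board_size.toNat, (Int.toNat_of_nonneg (le_of_lt hpos)).symm⟩
    have hN : 0 < N := by exact_mod_cast hpos
    have hr0 : PySem.List.pyRange 0 (N : Int) 1
        = (List.range N).map (fun (k : Nat) => (0 : Int) + (k : Int)) := by
      rw [PySem.List.pyRange_one, show (((N : Int)) - 0).toNat = N by omega]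
    have hr1 : PySem.List.pyRange 1 ((N : Int) - 1) 1
        = (List.range (N - 2)).map (fun (k : Nat) => (1 : Int) + (k : Int)) := by
      rw [PySem.List.pyRange_one, show (((N : Int) - 1) - 1).toNat = N - 2 by omega]
    rw [declare_empty_table, hr0, hr1]
    simp only [List.foldl_map]
    have e0 := PySem.List.foldl_congr_mem (l := List.range N)
      (f := fun (b : List (List String)) (k : Nat) =>
        (List.range N).foldl
          (fun bb (_ : Nat) => bb.set ((0 : Int) + (k : Int)).toNat
            ((bb.getD ((0 : Int) + (k : Int)).toNat []) ++ [" "])) (b ++ [([] : List String)]))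
      (g := fun (b : List (List String)) (k : Nat) =>
        (List.range N).foldl (fun bb (_ : Nat) => bb.set k ((bb.getD k []) ++ [" "]))
          (b ++ [([] : List String)]))
      (init := ([] : List (List String)))
      (by intro b k _
          beta_reduce
          have hk : ((0 : Int) + (k : Int)).toNat = k := by omega
          rw [hk])
    rw [e0, build_phase N N]
    have e1 := PySem.List.foldl_congr_mem (l := List.range N)
      (f := fun (b : List (List String)) (k : Nat) =>
        pySet2 (pySet2 b 0 ((0 : Int) + (k : Int)).toNat "_")
          ((N : Int) - 1).toNat ((0 : Int) + (k : Int)).toNat "-")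
      (g := fun (b : List (List String)) (k : Nat) =>
        pySet2 (pySet2 b 0 k "_") (N - 1) k "-")
      (init := List.replicate N (List.replicate N " "))
      (by intro b k _
          beta_reduce
          have hk : ((0 : Int) + (k : Int)).toNat = k := by omega
          have hk2 : ((N : Int) - 1).toNat = N - 1 := by omega
          rw [hk, hk2])
    rw [e1, pass1 N hN N le_rfl]
    have e2 := PySem.List.foldl_congr_mem (l := List.range (N - 2))
      (f := fun (b : List (List String)) (k : Nat) =>
        pySet2 (pySet2 b ((1 : Int) + (k : Int)).toNat 0 "|")
          ((1 : Int) + (k : Int)).toNat ((N : Int) - 1).toNat "|")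
      (g := fun (b : List (List String)) (k : Nat) =>
        pySet2 (pySet2 b (1 + k) 0 "|") (1 + k) (N - 1) "|")
      (init := stage1 N N)
      (by intro b k _
          beta_reduce
          have hk : ((1 : Int) + (k : Int)).toNat = 1 + k := by omega
          have hk2 : ((N : Int) - 1).toNat = N - 1 := by omega
          rw [hk, hk2])
    rw [e2]
    by_cases h2 : 2 ≤ N
    · rw [pass2 N h2 (N - 2) le_rfl, alt_eq_stage2 N hN]
    · have hN1 : N = 1 := by omega
      subst hN1
      simp only [show (1 : Nat) - 2 = 0 from rfl, List.range_zero, List.foldl_nil]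
      rw [alt_eq_stage2 1 (by norm_num)]
      exact (stage2_zero 1).symm
  · have hle : board_size ≤ 0 := by omega
    rw [declare_empty_table, declare_empty_table_alt]
    rw [PySem.List.pyRange_one_eq_nil hle, PySem.List.pyRange_one_eq_nil (by omega)]
    rfl

-- ===== VERDICT (by name: the statement is the Claim_ definition above) =====
theorem declare_empty_table_spec : Claim_equal_declare_empty_table := by
  intro board_size _
  unfold Spec_declare_empty_table
  exact main_eq board_size
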